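-- pv_equiv track=rewrite | github.com/danwilhelm/max_list_puzzle | helpers.py | tokenize_2
-- ===== SOURCE A (Python) =====
-- def tokenize_2(nums: list[int]) -> list[int]:
--     """Tokenize a list of numbers for Model 2.
--     Example: [42, 7, 85] -> [BOS, 4, 2, SEP, 0, 7, SEP, 8, 5, ANS]"""
--     BOS, SEP, ANS, EOS = 10, 11, 12, 13
--     tokens = [BOS]
--     for i, n in enumerate(nums):
--         tokens.append(n // 10)
--         tokens.append(n % 10)
--         if i < len(nums) - 1:
--             tokens.append(SEP)
--     tokens.append(ANS)
--     return tokens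
-- ===== SOURCE B (Python) =====
-- def tokenize_2(nums: list[int]) -> list[int]:
--     """Tokenize a list of numbers for Model 2.
--     Example: [42, 7, 85] -> [BOS, 4, 2, SEP, 0, 7, SEP, 8, 5, ANS]"""
--     BOS, SEP, ANS = 10, 11, 12
--
--     def tok(j: int) -> int:
--         # token at body position j, computed from the position alone:
--         # positions come in blocks of 3 (tens digit, ones digit, separator)
--         q, r = divmod(j, 3)
--         if r == 0:
--             return nums[q] // 10
--         if r == 1:
--             return nums[q] % 10
--         return SEP
--
--     return [BOS] + [tok(j) for j in range(max(0, 3 * len(nums) - 1))] + [ANS]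
-- ===== Notes on version B (the rewrite author's own statement) =====
-- stated objective: alternative
-- what changed: Replaces A's accumulator loop over nums with a position-indexed table construction: the body has exactly max(0, 3*len(nums)-1) tokens and the token at position j is computed directly from j via divmod(j,3) (tens digit, ones digit, or SEP), so no iteration over nums and no separator branch exist.
import Mathlib
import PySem

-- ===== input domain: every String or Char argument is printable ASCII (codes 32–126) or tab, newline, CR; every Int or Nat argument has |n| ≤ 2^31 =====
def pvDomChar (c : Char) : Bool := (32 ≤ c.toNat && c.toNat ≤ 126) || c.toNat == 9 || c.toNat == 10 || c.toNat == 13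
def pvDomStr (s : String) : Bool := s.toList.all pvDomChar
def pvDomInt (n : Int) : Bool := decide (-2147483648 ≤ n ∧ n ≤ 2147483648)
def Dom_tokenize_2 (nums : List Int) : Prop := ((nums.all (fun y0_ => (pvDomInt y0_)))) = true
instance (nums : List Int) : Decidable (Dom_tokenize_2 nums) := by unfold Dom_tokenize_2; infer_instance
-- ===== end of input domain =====

-- B replaces A's accumulator loop over nums with a position-indexed table: the j-th body
-- token is computed from j via divmod(j,3); alternative construction, same O(n) cost.


-- ===== PORT A =====
-- for i, n in enumerate(nums): append n//10, n%10, and SEP when i < len(nums)-1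
def tokenize_2 (nums : List Int) : List Int :=
  let tokens : List Int :=
    (PySem.List.enumerate nums).foldl
      (fun t p =>
        let t := t ++ [PySem.Int.floordiv p.2 10]
        let t := t ++ [PySem.Int.mod p.2 10]
        if p.1 < (nums.length : Int) - 1 then t ++ [11] else t)
      [10]
  tokens ++ [12]

-- ===== PORT B =====
-- tok(j): token at body position j, from divmod(j, 3); the index q is always in
-- range in every executed call (q < len(nums)), so pyGetD with default 0 is exact
def pvTok (nums : List Int) (j : Int) : Int :=
  let q := PySem.Int.floordiv j 3
  let r := PySem.Int.mod j 3
  if r = 0 then PySem.Int.floordiv (PySem.List.pyGetD nums q 0) 10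
  else if r = 1 then PySem.Int.mod (PySem.List.pyGetD nums q 0) 10
  else 11

def tokenize_2_alt (nums : List Int) : List Int :=
  [10] ++ (PySem.List.pyRange 0 (max 0 (3 * (nums.length : Int) - 1)) 1).map (pvTok nums) ++ [12]

-- ===== PRECONDITION & SPEC =====
def Spec_tokenize_2 (nums : List Int) (out : List Int) : Prop := out = tokenize_2_alt nums
instance (nums : List Int) (out : List Int) : Decidable (Spec_tokenize_2 nums out) := by unfold Spec_tokenize_2; infer_instance

-- ===== CLAIM =====
def Claim_equal_tokenize_2 : Prop := ∀ (nums : List Int), Dom_tokenize_2 nums → Spec_tokenize_2 nums (tokenize_2 nums)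

-- ===== LEMMAS AND PROOFS =====

-- the two body digits of one number
def pvChunk (n : Int) : List Int := [PySem.Int.floordiv n 10, PySem.Int.mod n 10]

-- reference body: chunks interposed with SEP = 11
def pvBody : List Int → List Int
  | [] => []
  | [n] => pvChunk n
  | n :: xs => pvChunk n ++ 11 :: pvBody xs

theorem pvA_loop (xs : List Int) (L s : Int) (hL : L = s + xs.length) (acc : List Int) :
    (PySem.List.enumerate xs s).foldl
      (fun t p =>
        let t := t ++ [PySem.Int.floordiv p.2 10]
        let t := t ++ [PySem.Int.mod p.2 10]
        if p.1 < L - 1 then t ++ [11] else t) acc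
    = acc ++ pvBody xs := by
  induction xs generalizing s acc with
  | nil => simp [PySem.List.enumerate_nil, pvBody]
  | cons x xs ih =>
    rw [PySem.List.enumerate_cons]
    simp only [List.foldl_cons]
    rcases xs with _ | ⟨y, ys⟩
    · have : ¬ (s < L - 1) := by simp at hL; omega
      simp [this, pvBody, pvChunk]
    · have hlt : s < L - 1 := by simp at hL; omega
      rw [ih (s + 1) (by simp at hL ⊢; omega)]
      simp [hlt, pvBody, pvChunk]

-- the first three entries of the token table
theorem pvTok_zero (x : Int) (xs : List Int) :
    pvTok (x :: xs) 0 = PySem.Int.floordiv x 10 := by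
  unfold pvTok
  rw [show PySem.Int.floordiv 0 3 = 0 from by decide,
      show PySem.Int.mod 0 3 = 0 from by decide]
  simp [PySem.List.pyGetD_zero_cons]

theorem pvTok_one (x : Int) (xs : List Int) :
    pvTok (x :: xs) 1 = PySem.Int.mod x 10 := by
  unfold pvTok
  rw [show PySem.Int.floordiv 1 3 = 0 from by decide,
      show PySem.Int.mod 1 3 = 1 from by decide]
  simp [PySem.List.pyGetD_zero_cons]

theorem pvTok_two (nums : List Int) : pvTok nums 2 = 11 := by
  unfold pvTok
  rw [show PySem.Int.mod 2 3 = 2 from by decide]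
  simp

-- shift: the token table of x :: xs at position k + 3 is the table of xs at position k
theorem pvTok_shift (x : Int) (xs : List Int) (k : ℕ) :
    pvTok (x :: xs) (((k + 3 : ℕ) : Int)) = pvTok xs (k : Int) := by
  unfold pvTok
  rw [show (3 : ℤ) = ((3 : ℕ) : ℤ) from rfl]
  simp only [PySem.Int.floordiv_natCast, PySem.Int.mod_natCast, PySem.List.pyGetD_natCast]
  rw [Nat.add_div_right k (by norm_num), Nat.add_mod_right k 3]
  simp [List.getD]

-- the body table equals the reference body
theorem pvB_table (xs : List Int) :
    (List.range (max 0 (3 * (xs.length : Int) - 1)).toNat).map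
      (fun k : ℕ => pvTok xs (k : Int)) = pvBody xs := by
  induction xs with
  | nil => simp [pvBody]
  | cons x xs ih =>
    rcases xs with _ | ⟨y, ys⟩
    · have h2 : (max 0 (3 * (([x] : List Int).length : Int) - 1)).toNat = 2 := by simp
      rw [h2]
      simp [List.range_succ, pvTok_zero, pvTok_one, pvBody, pvChunk]
    · set t := y :: ys with ht
      have hlen : (max 0 (3 * ((x :: t).length : Int) - 1)).toNat
          = 3 + (max 0 (3 * (t.length : Int) - 1)).toNat := by
        simp [ht]; omega
      rw [hlen, List.range_add, List.map_append, List.map_map]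
      have h012 : (List.range 3).map (fun k : ℕ => pvTok (x :: t) (k : Int))
          = pvChunk x ++ [11] := by
        simp [List.range_succ, pvTok_zero, pvTok_one, pvTok_two, pvChunk]
      have hsh : (List.range (max 0 (3 * (t.length : Int) - 1)).toNat).map
            ((fun k : ℕ => pvTok (x :: t) (k : Int)) ∘ (fun k => 3 + k))
          = (List.range (max 0 (3 * (t.length : Int) - 1)).toNat).map
            (fun k : ℕ => pvTok t (k : Int)) := by
        refine List.map_congr_left (fun k _ => ?_)
        simp only [Function.comp_def]
        rw [show 3 + k = k + 3 from by omega, pvTok_shift]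
      rw [h012, hsh, ih]
      simp [ht, pvBody]

-- ===== VERDICT =====
theorem tokenize_2_spec : Claim_equal_tokenize_2 := by
  intro nums _
  unfold Spec_tokenize_2 tokenize_2 tokenize_2_alt
  rw [pvA_loop nums (nums.length : Int) 0 (by simp), PySem.List.pyRange_one, List.map_map]
  have hmap : (List.range ((max 0 (3 * (nums.length : Int) - 1)) - 0).toNat).map
        ((pvTok nums) ∘ (fun k : ℕ => (0 : ℤ) + (k : ℤ)))
      = (List.range (max 0 (3 * (nums.length : Int) - 1)).toNat).map
        (fun k : ℕ => pvTok nums (k : Int)) := by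
    rw [Int.sub_zero]
    exact List.map_congr_left (fun k _ => by simp)
  rw [hmap, pvB_table]
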